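-- pv_equiv track=rewrite | github.com/uppeabhishek/problem-solving | python/codechef/april_lunchtime_2022/PAIRPAIN.py | pair_pain
-- ===== SOURCE A (Python) =====
-- def pair_pain(pair):
--     ones = 0
--     twos = 0
--     new_array = []
--     for i, p in enumerate(pair):
--         if p == 1:
--             ones += len(pair) - i - 1
--             if len(new_array):
--                 new_array.append(p)
--         elif p == 2:
--             new_array.append(p)
--
--     for i, ele in enumerate(new_array):
--         if ele == 2:
--             twos += len(new_array) - i - 1
--
--     return ones + twos
-- ===== SOURCE B (Python) =====
-- def pair_pain(pair):
--     # One reverse pass with two suffix counters; no intermediate list is built.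
--     res = 0
--     total_after = 0
--     onetwo_after = 0
--     for p in reversed(pair):
--         if p == 1:
--             res += total_after
--         elif p == 2:
--             res += onetwo_after
--         total_after += 1
--         if p == 1 or p == 2:
--             onetwo_after += 1
--     return res
-- ===== Notes on version B (the rewrite author's own statement) =====
-- stated objective: alternative
-- what changed: Replaces the two forward enumerate passes and the intermediate new_array list with a single reverse pass maintaining two suffix counters (elements after, 1s-and-2s after); no intermediate list is built.
import Mathlib
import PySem

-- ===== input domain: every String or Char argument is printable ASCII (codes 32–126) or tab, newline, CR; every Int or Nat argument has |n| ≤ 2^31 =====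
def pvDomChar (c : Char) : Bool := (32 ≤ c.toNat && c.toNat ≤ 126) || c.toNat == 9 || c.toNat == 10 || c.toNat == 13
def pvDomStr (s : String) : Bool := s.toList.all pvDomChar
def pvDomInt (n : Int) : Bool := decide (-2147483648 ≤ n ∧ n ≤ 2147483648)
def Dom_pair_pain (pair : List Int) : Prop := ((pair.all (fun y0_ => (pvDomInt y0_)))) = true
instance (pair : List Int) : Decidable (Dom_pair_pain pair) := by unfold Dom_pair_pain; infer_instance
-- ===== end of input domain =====

-- B replaces A's two enumerate passes and intermediate new_array by one reverse pass with two suffix counters (O(1) extra space).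

-- ===== PORT A =====
-- body of A's first for-loop (n = len(pair)); appends exactly as the Python does
def pairPainStep1 (n : Int) (st : Int × List Int) (ip : Int × Int) : Int × List Int :=
  if ip.2 = 1 then
    (st.1 + n - ip.1 - 1, if st.2.length ≠ 0 then st.2 ++ [ip.2] else st.2)
  else if ip.2 = 2 then (st.1, st.2 ++ [ip.2])
  else st

-- body of A's second for-loop (m = len(new_array))
def pairPainStep2 (m : Int) (t : Int) (ie : Int × Int) : Int :=
  if ie.2 = 2 then t + m - ie.1 - 1 else t

def pair_pain (pair : List Int) : Int :=
  let s := (PySem.List.enumerate pair).foldl (pairPainStep1 (pair.length : Int)) (0, [])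
  let ones := s.1
  let new_array := s.2
  let twos := (PySem.List.enumerate new_array).foldl
    (pairPainStep2 (new_array.length : Int)) 0
  ones + twos

-- ===== PORT B =====
-- state (res, total_after, onetwo_after), built from the right = Source B's loop over reversed(pair)
def pairPainGo : List Int → Int × Int × Int
  | [] => (0, 0, 0)
  | p :: xs =>
    let st := pairPainGo xs
    (if p = 1 then st.1 + st.2.1 else if p = 2 then st.1 + st.2.2 else st.1,
     st.2.1 + 1,
     if p = 1 ∨ p = 2 then st.2.2 + 1 else st.2.2)

def pair_pain_alt (pair : List Int) : Int := (pairPainGo pair).1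

-- ===== PRECONDITION & SPEC =====
def Spec_pair_pain (pair : List Int) (out : Int) : Prop := out = pair_pain_alt pair
instance (pair : List Int) (out : Int) : Decidable (Spec_pair_pain pair out) := by unfold Spec_pair_pain; infer_instance

-- ===== CLAIM (what is proved, stated in full; the proofs are below) =====
def Claim_equal_pair_pain : Prop := ∀ (pair : List Int), Dom_pair_pain pair → Spec_pair_pain pair (pair_pain pair)

-- ===== LEMMAS AND PROOFS =====

-- closed-form pieces of A: ones, the new_array (flag = "new_array already nonempty"), twos
def onesF : List Int → Int
  | [] => 0
  | x :: xs => (if x = 1 then (xs.length : Int) else 0) + onesF xs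

def naF : Bool → List Int → List Int
  | _, [] => []
  | f, x :: xs =>
    if x = 2 then x :: naF true xs
    else if x = 1 ∧ f then x :: naF f xs
    else naF f xs

def twF : List Int → Int
  | [] => 0
  | x :: xs => (if x = 2 then (xs.length : Int) else 0) + twF xs

theorem naF_true_length (l : List Int) :
    ((naF true l).length : Int) = (pairPainGo l).2.2 := by
  induction l with
  | nil => simp [naF, pairPainGo]
  | cons x xs ih =>
    by_cases h2 : x = 2 <;> by_cases h1 : x = 1 <;>
      simp [naF, pairPainGo, h1, h2, ih]

theorem twF_naF_flag (l : List Int) : twF (naF true l) = twF (naF false l) := by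
  induction l with
  | nil => rfl
  | cons x xs ih =>
    by_cases h2 : x = 2 <;> by_cases h1 : x = 1 <;>
      simp [naF, twF, h1, h2, ih]

theorem pairPainGo_total (l : List Int) : (pairPainGo l).2.1 = (l.length : Int) := by
  induction l with
  | nil => rfl
  | cons x xs ih => simp [pairPainGo, ih]

theorem pairPainGo_res (l : List Int) :
    (pairPainGo l).1 = onesF l + twF (naF false l) := by
  induction l with
  | nil => rfl
  | cons x xs ih =>
    by_cases h2 : x = 2 <;> by_cases h1 : x = 1
    · exact absurd h2 (by simp [h1])
    · -- x = 2
      simp [pairPainGo, onesF, naF, twF, h2, ih, ← naF_true_length, twF_naF_flag]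
      ring
    · -- x = 1
      simp [pairPainGo, onesF, naF, h1, ih, pairPainGo_total]
      try ring
    · simp [pairPainGo, onesF, naF, h1, h2, ih]

theorem isEmpty_append_singleton (b : List Int) (x : Int) :
    (b ++ [x]).isEmpty = false := by cases b <;> rfl

theorem len_cons_int (x : Int) (xs : List Int) :
    (((x :: xs).length : Int)) = (xs.length : Int) + 1 := by
  simp

-- first loop of A, generalized over start index and accumulator
theorem fold1_eq (n : Int) :
    ∀ (l : List Int) (k a : Int) (b : List Int), k + l.length = n →
    (PySem.List.enumerate l k).foldl (pairPainStep1 n) (a, b)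
    = (a + onesF l, b ++ naF (!b.isEmpty) l) := by
  intro l
  induction l with
  | nil => intro k a b hk; simp [PySem.List.enumerate_nil, onesF, naF]
  | cons x xs ih =>
    intro k a b hk
    rw [len_cons_int] at hk
    rw [PySem.List.enumerate_cons, List.foldl_cons]
    by_cases h2 : x = 2 <;> by_cases h1 : x = 1
    · omega
    · -- x = 2
      rw [show pairPainStep1 n (a, b) (k, x) = (a, b ++ [x]) by
        simp [pairPainStep1, h2]]
      rw [ih (k + 1) a (b ++ [x]) (by omega)]
      simp [naF, onesF, h2, isEmpty_append_singleton]
    · -- x = 1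
      by_cases hb : b = []
      · rw [show pairPainStep1 n (a, b) (k, x) = (a + n - k - 1, b) by
          simp [pairPainStep1, h1, hb]]
        rw [ih (k + 1) _ b (by omega)]
        subst hb
        simp [onesF, naF, h1]
        omega
      · rw [show pairPainStep1 n (a, b) (k, x) = (a + n - k - 1, b ++ [x]) by
          simp [pairPainStep1, h1, hb]]
        rw [ih (k + 1) _ (b ++ [x]) (by omega)]
        have hb' : b.isEmpty = false := by cases b <;> simp_all
        have hb2 : (b ++ [x]).isEmpty = false := by cases b <;> simp
        simp only [Prod.mk.injEq]
        constructor
        · simp [onesF, h1]; omega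
        · simp [hb', naF, h1, isEmpty_append_singleton]
    · rw [show pairPainStep1 n (a, b) (k, x) = (a, b) by
        simp [pairPainStep1, h1, h2]]
      rw [ih (k + 1) a b (by omega)]
      simp [onesF, naF, h1, h2]

-- second loop of A, generalized over start index and accumulator
theorem fold2_eq (n : Int) :
    ∀ (l : List Int) (k t : Int), k + l.length = n →
    (PySem.List.enumerate l k).foldl (pairPainStep2 n) t = t + twF l := by
  intro l
  induction l with
  | nil => intro k t hk; simp [PySem.List.enumerate_nil, twF]
  | cons x xs ih =>
    intro k t hk
    rw [len_cons_int] at hk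
    rw [PySem.List.enumerate_cons, List.foldl_cons]
    by_cases h2 : x = 2
    · rw [show pairPainStep2 n t (k, x) = t + n - k - 1 by simp [pairPainStep2, h2]]
      rw [ih (k + 1) _ (by omega)]
      simp [twF, h2]
      omega
    · rw [show pairPainStep2 n t (k, x) = t by simp [pairPainStep2, h2]]
      rw [ih (k + 1) _ (by omega)]
      simp [twF, h2]

theorem pair_pain_eq (pair : List Int) :
    pair_pain pair = onesF pair + twF (naF false pair) := by
  unfold pair_pain
  rw [fold1_eq (pair.length : Int) pair 0 0 [] (by simp)]
  simp only [List.nil_append, List.isEmpty_nil, Bool.not_true]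
  rw [fold2_eq ((naF false pair).length : Int) _ 0 0 (by simp)]
  simp

-- ===== VERDICT (by name: the statement is the Claim_ definition above) =====
theorem pair_pain_spec : Claim_equal_pair_pain := by
  intro pair _
  unfold Spec_pair_pain pair_pain_alt
  rw [pair_pain_eq, pairPainGo_res]
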